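-- pv_equiv track=rewrite | github.com/xymon2/Coding-Test | graph/dfsbbfs1.py | dfs
-- ===== SOURCE A (Python) =====
-- def dfs(numbers):
--     if len(numbers) == 1:
--         return [[1], [-1]]
--
--     else:
--         numbers.pop()
--         a_list = dfs(numbers)
--         b_list = []
--         for item in a_list:
--             item2 = item[:]
--             item2.append(-1)
--             item.append(1)
--             b_list.append(item2)
--
--         a_list.extend(b_list)
--
--     return a_list
-- ===== SOURCE B (Python) =====
-- def dfs(numbers):
--     n = len(numbers)
--     return [[-1 if (k >> j) & 1 else 1 for j in range(n)]
--             for k in range(2 ** n)]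
-- ===== Notes on version B (the rewrite author's own statement) =====
-- stated objective: idiomatic
-- what changed: Replaces the recursive doubling (pop, recurse, copy rows appending +1/-1) with a flat nested comprehension reading each sign combination off the bits of a counter k in range(2**n); B does not mutate its argument (A truncates numbers in place) and Pre_ excludes only the empty list, where A raises IndexError.
import Mathlib
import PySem

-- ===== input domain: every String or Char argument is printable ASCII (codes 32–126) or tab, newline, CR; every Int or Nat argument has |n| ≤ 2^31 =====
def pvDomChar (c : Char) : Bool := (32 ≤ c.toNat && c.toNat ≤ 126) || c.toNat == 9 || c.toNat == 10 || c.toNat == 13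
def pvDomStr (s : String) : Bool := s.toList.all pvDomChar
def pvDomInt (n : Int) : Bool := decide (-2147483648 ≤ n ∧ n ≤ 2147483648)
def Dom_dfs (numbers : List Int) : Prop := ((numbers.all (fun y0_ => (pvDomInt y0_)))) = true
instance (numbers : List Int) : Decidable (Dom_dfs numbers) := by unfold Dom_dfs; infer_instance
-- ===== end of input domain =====

-- B replaces A's recursive doubling with a flat bit-counting comprehension; equivalence is about
-- the RETURN value only: A truncates its argument in place to its first element, B does not mutate.

-- ===== PORT A =====
-- A's recursion: pop the last element, recurse, then one pass over the recursive result
-- building (rows with 1 appended, rows with -1 appended), concatenated.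
def dfs (numbers : List Int) : List (List Int) :=
  if numbers.length = 1 then [[1], [-1]]
  else
    match numbers with
    | [] => []  -- Python raises IndexError here (numbers.pop() on empty); excluded by Pre_dfs
    | x :: t =>
      let a_list := dfs ((x :: t).dropLast)
      let p := a_list.foldl
        (fun (acc : List (List Int) × List (List Int)) item =>
          (acc.1 ++ [item ++ [1]], acc.2 ++ [item ++ [-1]])) ([], [])
      p.1 ++ p.2
termination_by numbers.length
decreasing_by simp [List.length_dropLast]

-- ===== PORT B =====
def dfs_alt (numbers : List Int) : List (List Int) :=
  let n := numbers.length
  (List.range (2 ^ n)).map (fun k =>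
    (List.range n).map (fun j => if k.testBit j then (-1 : Int) else 1))

-- ===== PRECONDITION & SPEC =====
-- Pre_ excludes only the empty list, on which Python's numbers.pop() raises IndexError.
def Pre_dfs (numbers : List Int) : Prop := numbers ≠ []
instance (numbers : List Int) : Decidable (Pre_dfs numbers) := by unfold Pre_dfs; infer_instance
def pvWitness_dfs : List Int := ([3, 7])

def Spec_dfs (numbers : List Int) (out : List (List Int)) : Prop := out = dfs_alt numbers
instance (numbers : List Int) (out : List (List Int)) : Decidable (Spec_dfs numbers out) := by unfold Spec_dfs; infer_instance

-- ===== CLAIM (what is proved, stated in full; the proofs are below) =====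
def Claim_equal_dfs : Prop := ∀ (numbers : List Int), Dom_dfs numbers → Pre_dfs numbers → Spec_dfs numbers (dfs numbers)

-- ===== LEMMAS AND PROOFS =====

-- bit arithmetic for the B side
theorem tb_mid (n j k : ℕ) (hj : j < n) : (2 ^ n + k).testBit j = k.testBit j := by
  rw [Nat.testBit_eq_decide_div_mod_eq, Nat.testBit_eq_decide_div_mod_eq]
  have h1 : (2 ^ n + k) / 2 ^ j = 2 ^ (n - j) + k / 2 ^ j := by
    rw [show (2:ℕ) ^ n = 2 ^ (n - j) * 2 ^ j by rw [← pow_add]; congr 1; omega, add_comm,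
        Nat.add_mul_div_right _ _ (Nat.two_pow_pos j)]
    omega
  have h2 : (2:ℕ) ^ (n - j) = 2 * 2 ^ (n - j - 1) := by
    rw [← pow_succ']; congr 1; omega
  rw [h1, h2]; simp only [decide_eq_decide]; omega

theorem tb_top (n k : ℕ) (hk : k < 2 ^ n) : (2 ^ n + k).testBit n = true := by
  rw [Nat.testBit_eq_decide_div_mod_eq]
  have h : (2 ^ n + k) / 2 ^ n = 1 := by
    rw [Nat.add_div_left _ (Nat.two_pow_pos n), Nat.div_eq_of_lt hk]
  rw [h]; decide

-- B's result as a function of the length alone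
def rows (n : ℕ) : List (List Int) :=
  (List.range (2 ^ n)).map (fun k =>
    (List.range n).map (fun j => if k.testBit j then (-1 : Int) else 1))

theorem dfs_alt_eq_rows (l : List Int) : dfs_alt l = rows l.length := rfl

-- A's loop in closed form
theorem foldl_pair (xs : List (List Int)) (p q : List (List Int)) :
    xs.foldl (fun (acc : List (List Int) × List (List Int)) item =>
      (acc.1 ++ [item ++ [1]], acc.2 ++ [item ++ [(-1 : Int)]])) (p, q)
    = (p ++ xs.map (· ++ [1]), q ++ xs.map (· ++ [-1])) := by
  induction xs generalizing p q with
  | nil => simp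
  | cons x xs ih => simp [List.foldl, ih]

theorem rows_succ (n : ℕ) :
    rows (n + 1) = (rows n).map (· ++ [1]) ++ (rows n).map (· ++ [-1]) := by
  unfold rows
  rw [pow_succ, mul_two, show List.range (2 ^ n + 2 ^ n) = List.range (2 ^ n) ++ (List.range (2 ^ n)).map (2 ^ n + ·) from List.range_add, List.map_append]
  simp only [List.map_map]
  congr 1
  · apply List.map_congr_left
    intro k hk
    rw [List.mem_range] at hk
    simp only [Function.comp_apply]
    rw [List.range_succ, List.map_append]
    simp [Nat.testBit_lt_two_pow hk]
  · apply List.map_congr_left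
    intro k hk
    rw [List.mem_range] at hk
    simp only [Function.comp_apply]
    rw [List.range_succ, List.map_append]
    congr 1
    · apply List.map_congr_left
      intro j hj
      rw [List.mem_range] at hj
      rw [tb_mid n j k hj]
    · simp [tb_top n k hk]

theorem dfs_eq_rows : ∀ (n : ℕ) (l : List Int), l.length = n → 1 ≤ n → dfs l = rows n := by
  intro n
  induction n with
  | zero => intro l _ h; omega
  | succ n ih =>
    intro l hl _
    by_cases hn : n = 0
    · subst hn
      match l, hl with
      | [x], _ =>
        rw [dfs.eq_def]
        simp
        decide
    · rw [dfs.eq_def]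
      have hne : l.length ≠ 1 := by omega
      rw [if_neg (by omega)]
      match l, hl with
      | x :: t, hl =>
        simp only
        have hdl : (x :: t).dropLast.length = n := by
          simp [List.length_dropLast] at hl ⊢; omega
        rw [ih _ hdl (by omega), foldl_pair]
        simp [rows_succ n]

-- ===== VERDICT (by name: the statement is the Claim_ definition above) =====
theorem dfs_spec : Claim_equal_dfs := by
  intro l _ hpre
  have hlen : 1 ≤ l.length := by
    cases l with
    | nil => exact absurd rfl hpre
    | cons x t => simp
  unfold Spec_dfs
  rw [dfs_alt_eq_rows, dfs_eq_rows l.length l rfl hlen]
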